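-- pv_equiv track=rewrite | github.com/DemonTrue/biostrips | cyt_combinations.py | get_indices_products
-- ===== SOURCE A (Python) =====
-- def get_original_label(label_long):
--     label = label_long.split('-')[0]
--     original_label = ''
--
--     for el in label:
--         if el.isdigit():
--             continue
--         else:
--             original_label += el
--
--     return original_label
--
-- def get_indices_products(names, product_labels):
--     product_indices = []
--
--     for label in product_labels:
--         for i in range(len(names)):
--             original_name = get_original_label(names[i][0])
--             if len(names[i]) > 1 and label == original_name:
--                 product_indices.append(i)
--             else:
--                 continue
--
--     return product_indices
-- ===== SOURCE B (Python) =====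
-- def get_original_label(label_long):
--     label = label_long.split('-')[0]
--     return ''.join(el for el in label if not el.isdigit())
--
-- def get_indices_products(names, product_labels):
--     index = {}
--     for i, row in enumerate(names):
--         if len(row) > 1:
--             index.setdefault(get_original_label(row[0]), []).append(i)
--     out = []
--     for label in product_labels:
--         out += index.get(label, [])
--     return out
-- ===== Notes on version B (the rewrite author's own statement) =====
-- stated objective: faster
-- what changed: Instead of rescanning all names (and recomputing each original label) once per product label, B makes a single pass over names building a dict from original label to its index list, then concatenates the per-label lists; per-label work becomes a dict lookup.
import Mathlib
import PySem

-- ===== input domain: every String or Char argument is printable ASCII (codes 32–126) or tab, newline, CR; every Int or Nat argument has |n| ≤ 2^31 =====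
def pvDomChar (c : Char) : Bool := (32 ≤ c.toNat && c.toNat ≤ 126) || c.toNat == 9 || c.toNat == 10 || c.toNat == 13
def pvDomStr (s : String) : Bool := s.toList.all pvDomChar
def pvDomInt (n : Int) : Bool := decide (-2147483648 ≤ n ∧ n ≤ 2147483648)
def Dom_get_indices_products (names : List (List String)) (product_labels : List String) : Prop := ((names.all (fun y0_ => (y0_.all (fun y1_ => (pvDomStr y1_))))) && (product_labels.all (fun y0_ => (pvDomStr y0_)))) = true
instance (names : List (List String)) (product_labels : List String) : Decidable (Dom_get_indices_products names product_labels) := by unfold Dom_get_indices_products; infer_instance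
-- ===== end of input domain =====

-- B builds a dict from original label to index list in one pass over names, then concatenates
-- per product label, instead of A's rescan of all names for every label (objective: faster).

-- ===== PORT A =====
-- helper get_original_label (shared by both Pythons; A's version: an explicit accumulating loop)
def pvOrig (label_long : String) : String :=
  let label := PySem.List.pyGetD (PySem.Chars.splitOn label_long.toList ['-']) 0 []
  String.ofList (label.foldl (fun acc el => if PySem.Chars.isdigit el then acc else acc ++ [el]) [])

def get_indices_products (names : List (List String)) (product_labels : List String) : List Int :=
  product_labels.foldl (fun acc label =>
    (PySem.List.pyRange 0 (names.length : Int) 1).foldl (fun acc2 i =>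
      let row := PySem.List.pyGetD names i []
      let original_name := pvOrig (PySem.List.pyGetD row 0 "")
      if decide (1 < row.length) && (label == original_name) then acc2 ++ [i] else acc2) acc) []

-- ===== PORT B =====
-- B's get_original_label: a filter comprehension joined into a string
def pvOrigB (label_long : String) : String :=
  let label := PySem.List.pyGetD (PySem.Chars.splitOn label_long.toList ['-']) 0 []
  String.ofList (label.filter (fun el => !PySem.Chars.isdigit el))

-- the index dict: one pass over enumerate(names), grouping indices by original label
def pvBuildIndex (names : List (List String)) : PySem.Dict String (List Int) :=
  (PySem.List.enumerate names).foldl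
    (fun d p => if decide (1 < p.2.length) then
        d.modify (pvOrigB (PySem.List.pyGetD p.2 0 "")) [] (· ++ [p.1]) else d)
    PySem.Dict.empty

def get_indices_products_alt (names : List (List String)) (product_labels : List String) : List Int :=
  product_labels.foldl (fun out label => out ++ (pvBuildIndex names).getD label []) []

-- ===== PRECONDITION & SPEC =====
-- A raises IndexError on names[i][0] whenever product_labels is nonempty and some row of
-- names is the empty list; Pre_ excludes exactly those inputs.
def Pre_get_indices_products (names : List (List String)) (product_labels : List String) : Prop :=
  product_labels = [] ∨ ∀ row ∈ names, row ≠ []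
instance (names : List (List String)) (product_labels : List String) : Decidable (Pre_get_indices_products names product_labels) := by unfold Pre_get_indices_products; infer_instance

def pvWitness_get_indices_products : List (List String) × List String :=
  ([["ab-1", "x"], ["c"]], ["ab"])

def Spec_get_indices_products (names : List (List String)) (product_labels : List String) (out : List Int) : Prop := out = get_indices_products_alt names product_labels
instance (names : List (List String)) (product_labels : List String) (out : List Int) : Decidable (Spec_get_indices_products names product_labels out) := by unfold Spec_get_indices_products; infer_instance

-- ===== CLAIM (what is proved, stated in full; the proofs are below) =====
def Claim_equal_get_indices_products : Prop := ∀ (names : List (List String)) (product_labels : List String), Dom_get_indices_products names product_labels → Pre_get_indices_products names product_labels → Spec_get_indices_products names product_labels (get_indices_products names product_labels)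

-- ===== LEMMAS AND PROOFS =====

-- A's digit-skipping accumulation loop builds exactly B's filter
theorem foldl_skip_digits (l : List Char) :
    l.foldl (fun acc el => if PySem.Chars.isdigit el then acc else acc ++ [el]) []
    = l.filter (fun el => !PySem.Chars.isdigit el) := by
  rw [show (fun (acc : List Char) el => if PySem.Chars.isdigit el then acc else acc ++ [el])
        = (fun acc el => if !PySem.Chars.isdigit el then acc ++ [el] else acc) from
      funext fun acc => funext fun el => by cases PySem.Chars.isdigit el <;> simp]
  rw [PySem.List.foldl_append_if_eq_filter]
  simp

-- the two transliterations of get_original_label agree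
theorem pvOrigB_eq (s : String) : pvOrigB s = pvOrig s := by
  simp only [pvOrig, pvOrigB, foldl_skip_digits]

-- the condition each program tests on row i, as a predicate on the pair (i, row)
def pvCond (label : String) (p : Int × List String) : Bool :=
  decide (1 < p.2.length) && (label == pvOrig (PySem.List.pyGetD p.2 0 ""))

-- B's grouping fold with the guard = a plain modify-fold over the filtered, keyed pairs
theorem fold_guard_eq (l : List (Int × List String)) (d : PySem.Dict String (List Int)) :
    l.foldl (fun d p => if decide (1 < p.2.length) then
        d.modify (pvOrigB (PySem.List.pyGetD p.2 0 "")) [] (· ++ [p.1]) else d) d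
    = ((l.filter (fun p => decide (1 < p.2.length))).map
        (fun p => (pvOrigB (PySem.List.pyGetD p.2 0 ""), p.1))).foldl
        (fun d q => d.modify q.1 [] (· ++ [q.2])) d := by
  induction l generalizing d with
  | nil => rfl
  | cons x xs ih =>
    by_cases h : 1 < x.2.length
    · simp only [List.foldl_cons, List.filter_cons, h, decide_true, List.map_cons, ite_true]
      exact ih _
    · simp only [List.foldl_cons, List.filter_cons, h, decide_false, Bool.false_eq_true,
        ite_false]
      exact ih _

-- what B's dict lookup returns for a label
theorem idx_getD_eq (names : List (List String)) (label : String) :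
    (pvBuildIndex names).getD label []
    = ((PySem.List.enumerate names).filter (pvCond label)).map (·.1) := by
  unfold pvBuildIndex
  rw [fold_guard_eq, PySem.Dict.getD_foldl_modify_append]
  simp only [PySem.Dict.getD_empty, List.nil_append, List.filter_map, List.map_map,
    List.filter_filter, Function.comp_def]
  rw [List.filter_congr (q := pvCond label) (fun p _ => by
    simp only [pvCond, pvOrigB_eq]
    cases decide (1 < p.2.length) <;> simp [eq_comm])]

-- A's inner scan for a label = the same filtered enumerate, projected to indices
theorem a_inner_eq (names : List (List String)) (label : String) (acc : List Int) :
    (PySem.List.pyRange 0 (names.length : Int) 1).foldl (fun acc2 i =>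
      let row := PySem.List.pyGetD names i []
      let original_name := pvOrig (PySem.List.pyGetD row 0 "")
      if decide (1 < row.length) && (label == original_name) then acc2 ++ [i] else acc2) acc
    = acc ++ ((PySem.List.enumerate names).filter (pvCond label)).map (·.1) := by
  change (PySem.List.pyRange 0 (names.length : Int) 1).foldl (fun acc2 i =>
      if pvCond label (i, PySem.List.pyGetD names i []) then acc2 ++ [i] else acc2) acc = _
  rw [PySem.List.foldl_append_if
    (p := fun i => pvCond label (i, PySem.List.pyGetD names i []))
    (f := fun i => i)]
  rw [PySem.List.enumerate_eq_map_pyRange (d := ([] : List String))]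
  simp [List.filter_map, List.map_map, Function.comp_def]

theorem get_indices_products_eq (names : List (List String)) (product_labels : List String) :
    get_indices_products names product_labels = get_indices_products_alt names product_labels := by
  simp only [get_indices_products, get_indices_products_alt]
  rw [show (fun (acc : List Int) label =>
      (PySem.List.pyRange 0 (names.length : Int) 1).foldl (fun acc2 i =>
        let row := PySem.List.pyGetD names i []
        let original_name := pvOrig (PySem.List.pyGetD row 0 "")
        if decide (1 < row.length) && (label == original_name) then acc2 ++ [i] else acc2) acc)
      = (fun acc label => acc ++ ((PySem.List.enumerate names).filter (pvCond label)).map (·.1))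
    from funext fun acc => funext fun label => a_inner_eq names label acc]
  rw [show (fun (out : List Int) label => out ++ (pvBuildIndex names).getD label [])
      = (fun out label => out ++ ((PySem.List.enumerate names).filter (pvCond label)).map (·.1))
    from funext fun out => funext fun label => by rw [idx_getD_eq]]

-- ===== VERDICT (by name: the statement is the Claim_ definition above) =====
theorem get_indices_products_spec : Claim_equal_get_indices_products := by
  intro names product_labels _ _
  unfold Spec_get_indices_products
  exact get_indices_products_eq names product_labels
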